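-- pv_equiv track=rewrite | github.com/Loafer24/2024 | курсовая2024/main.py | is_valid_element
-- ===== SOURCE A (Python) =====
-- def is_valid_element(element):
--     # Если элемент состоит только из минуса (например, "-"), это ошибка
--     if element == '-':
--         return False
--
--     # Если элемент начинается с минуса, удаляем его и проверяем остальную часть
--     if element.startswith('-'):
--         element = element[1:]  # Убираем минус для проверки
--
--     # Проверяем, что оставшаяся часть состоит только из цифр, запятых, точек или дробей
--     if '/' in element:
--         # Проверка на корректную дробь, например, "1/2" или "-3/4"
--         parts = element.split('/')
--         if len(parts) != 2 or not all(part.replace('.', '', 1).isdigit() for part in parts):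
--             return False
--
--     return all(char.isdigit() or char in '.,/' for char in element)
-- ===== SOURCE B (Python) =====
-- def is_valid_element(element):
--     # Single pass over the characters: classify each character and collect per-'/'-segment
--     # (digit, dot, comma) counts, then judge fraction vs plain form at the end.
--     if element == '-':
--         return False
--     body = element[1:] if element.startswith('-') else element
--     segs = []
--     digits = dots = commas = 0
--     ok = True
--     for c in body:
--         if c == '/':
--             segs.append((digits, dots, commas))
--             digits = dots = commas = 0
--         elif '0' <= c <= '9':
--             digits += 1
--         elif c == '.':
--             dots += 1
--         elif c == ',':
--             commas += 1
--         else: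
--             ok = False
--     segs.append((digits, dots, commas))
--     if not ok:
--         return False
--     if len(segs) == 1:
--         return True
--     return len(segs) == 2 and all(d >= 1 and t <= 1 and m == 0 for d, t, m in segs)
-- ===== Notes on version B (the rewrite author's own statement) =====
-- stated objective: alternative
-- what changed: A validates with three separate scans (a split on the slash, a per-part replace+isdigit test, and a final all-characters scan); B makes a single left-to-right pass that counts digits, dots and commas per slash-separated segment and judges fraction vs plain form once at the end.
import Mathlib
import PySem

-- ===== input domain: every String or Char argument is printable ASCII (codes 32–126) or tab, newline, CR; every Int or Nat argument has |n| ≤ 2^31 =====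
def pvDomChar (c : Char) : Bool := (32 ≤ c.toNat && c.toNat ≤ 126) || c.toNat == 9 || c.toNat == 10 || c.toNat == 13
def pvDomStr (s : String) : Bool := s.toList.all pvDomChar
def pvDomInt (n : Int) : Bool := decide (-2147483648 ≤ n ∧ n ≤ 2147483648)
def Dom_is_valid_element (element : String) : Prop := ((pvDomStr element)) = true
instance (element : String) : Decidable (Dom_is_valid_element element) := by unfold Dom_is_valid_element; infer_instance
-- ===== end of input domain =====

-- B replaces A's split/replace/isdigit triple scan by a single left-to-right pass that
-- counts digits/dots/commas per '/'-segment and judges the form at the end (alternative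
-- decomposition, same asymptotic cost).


-- ===== PORT A =====
/-- Hand port of Python `part.replace('.', '', 1)` (a count-limited replace, which PySem
    does not provide): removes the first '.' if any — exact for this old/new/count. -/
def pyReplaceDotOnce : List Char → List Char
  | [] => []
  | c :: rest => if c == '.' then rest else c :: pyReplaceDotOnce rest

def is_valid_element (element : String) : Bool :=
  if element == "-" then false
  else
    let e := if PySem.Chars.startswith element.toList ['-']
             then PySem.List.slice element.toList (some 1) none
             else element.toList
    let fracFail :=
      if PySem.Chars.isIn ['/'] e then
        let parts := PySem.Chars.splitOn e ['/']
        !(parts.length == 2) || !(parts.all fun part => PySem.Chars.strIsdigit (pyReplaceDotOnce part))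
      else false
    if fracFail then false
    else e.all fun c => PySem.Chars.isdigit c || ['.', ',', '/'].contains c

-- ===== PORT B =====
/-- Loop body of B's single pass: state = (finished segment stats, digits, dots, commas, ok). -/
def bStep (s : List (Nat × Nat × Nat) × Nat × Nat × Nat × Bool) (c : Char) :
    List (Nat × Nat × Nat) × Nat × Nat × Nat × Bool :=
  match s with
  | (segs, d, t, m, ok) =>
    if c == '/' then (segs ++ [(d, t, m)], 0, 0, 0, ok)
    else if decide ('0' ≤ c) && decide (c ≤ '9') then (segs, d + 1, t, m, ok)
    else if c == '.' then (segs, d, t + 1, m, ok)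
    else if c == ',' then (segs, d, t, m + 1, ok)
    else (segs, d, t, m, false)

def is_valid_element_alt (element : String) : Bool :=
  if element == "-" then false
  else
    let body := if PySem.Chars.startswith element.toList ['-']
                then PySem.List.slice element.toList (some 1) none
                else element.toList
    let st := body.foldl bStep ([], 0, 0, 0, true)
    let segs := st.1 ++ [(st.2.1, st.2.2.1, st.2.2.2.1)]
    if !st.2.2.2.2 then false
    else if segs.length == 1 then true
    else (segs.length == 2) && segs.all fun p => decide (1 ≤ p.1) && decide (p.2.1 ≤ 1) && (p.2.2 == 0)

-- ===== PRECONDITION & SPEC =====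
def Spec_is_valid_element (element : String) (out : Bool) : Prop := out = is_valid_element_alt element
instance (element : String) (out : Bool) : Decidable (Spec_is_valid_element element out) := by unfold Spec_is_valid_element; infer_instance

-- ===== CLAIM (what is proved, stated in full; the proofs are below) =====
def Claim_equal_is_valid_element : Prop := ∀ (element : String), Dom_is_valid_element element → Spec_is_valid_element element (is_valid_element element)

-- ===== LEMMAS AND PROOFS =====

/-- The '/'-segments of a string: (first segment, remaining segments). -/
def partsOf : List Char → List Char × List (List Char)
  | [] => ([], [])
  | c :: rest =>
    if c == '/' then ([], (partsOf rest).1 :: (partsOf rest).2)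
    else (c :: (partsOf rest).1, (partsOf rest).2)

/-- (digit count, '.' count, ',' count) of a segment. -/
def statsOf (p : List Char) : Nat × Nat × Nat :=
  (p.countP PySem.Chars.isdigit, p.count '.', p.count ',')

def addT (a b : Nat × Nat × Nat) : Nat × Nat × Nat :=
  (a.1 + b.1, a.2.1 + b.2.1, a.2.2 + b.2.2)

def good3 (c : Char) : Bool := PySem.Chars.isdigit c || c == '.' || c == ','
def good4 (c : Char) : Bool := PySem.Chars.isdigit c || c == '.' || c == ',' || c == '/'

lemma fold_spec (l : List Char) (segs : List (Nat × Nat × Nat)) (d t m : Nat) (ok : Bool) :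
    (let st := l.foldl bStep (segs, d, t, m, ok);
     (st.1 ++ [(st.2.1, st.2.2.1, st.2.2.2.1)], st.2.2.2.2)) =
    (segs ++ addT (d, t, m) (statsOf (partsOf l).1) :: ((partsOf l).2).map statsOf,
     ok && l.all good4) := by
  induction l generalizing segs d t m ok with
  | nil => simp [partsOf, statsOf, addT]
  | cons c rest ih =>
    simp only [List.foldl_cons, List.all_cons, partsOf]
    by_cases h1 : c == '/'
    · simp only [h1, if_true, bStep, ih, good4]
      simp [addT, statsOf, List.append_assoc, h1]
    · by_cases h2 : (decide ('0' ≤ c) && decide (c ≤ '9')) = true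
      · have hd : PySem.Chars.isdigit c = true := h2
        have hdot : (c == '.') = false := by
          simp only [Bool.and_eq_true, decide_eq_true_eq] at h2
          simp; rintro rfl; revert h2; decide
        have hcom : (c == ',') = false := by
          simp only [Bool.and_eq_true, decide_eq_true_eq] at h2
          simp; rintro rfl; revert h2; decide
        simp only [h1, bStep, h2, if_true, if_false, Bool.false_eq_true, ih, good4]
        simp [addT, statsOf, List.countP_cons, List.count_cons, hd, hdot, hcom, h1,
          Nat.add_comm, Nat.add_assoc, Nat.add_left_comm]
      · have hd : PySem.Chars.isdigit c = false := by
          revert h2; unfold PySem.Chars.isdigit; simp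
        by_cases h3 : c == '.'
        · have hcom : (c == ',') = false := by
            simp only [beq_iff_eq] at h3; subst h3; decide
          simp only [h1, bStep, h2, h3, if_true, if_false, Bool.false_eq_true, ih, good4]
          simp [addT, statsOf, List.countP_cons, List.count_cons, hd, h3, hcom, h1,
            Nat.add_comm, Nat.add_assoc, Nat.add_left_comm]
        · by_cases h4 : c == ','
          · have hdot : (c == '.') = false := by
              simp only [beq_iff_eq] at h4; subst h4; decide
            simp only [h1, bStep, h2, h3, h4, if_true, if_false, Bool.false_eq_true, ih, good4]
            simp [addT, statsOf, List.countP_cons, List.count_cons, hd, hdot, h4, h1,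
              Nat.add_comm, Nat.add_assoc, Nat.add_left_comm]
          · simp only [h1, bStep, h2, h3, h4, if_true, if_false, Bool.false_eq_true, ih, good4]
            simp [addT, statsOf, List.countP_cons, List.count_cons, hd, h3, h4, h1]

lemma go_spec (fuel : Nat) (l cur : List Char) (acc : List (List Char)) (h : l.length ≤ fuel) :
    PySem.Chars.splitOn.go ['/'] fuel l cur acc =
      acc.reverse ++ (cur.reverse ++ (partsOf l).1) :: (partsOf l).2 := by
  induction fuel generalizing l cur acc with
  | zero =>
    cases l with
    | nil => simp [PySem.Chars.splitOn.go, partsOf]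
    | cons c rest => simp at h
  | succ fuel ih =>
    cases l with
    | nil => simp [PySem.Chars.splitOn.go, partsOf]
    | cons c rest =>
      rw [PySem.Chars.splitOn.go]
      by_cases hc : c == '/'
      · have hpre : List.isPrefixOf ['/'] (c :: rest) = true := by
          simp only [beq_iff_eq] at hc; subst hc; simp [List.isPrefixOf]
        rw [if_pos hpre]
        simp only [List.length_singleton, List.drop_succ_cons, List.drop_zero]
        rw [ih rest [] ((cur.reverse) :: acc) (by simpa using Nat.le_of_succ_le_succ h)]
        simp [partsOf, hc]
      · have hpre : ¬ (List.isPrefixOf ['/'] (c :: rest) = true) := by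
          simp only [beq_iff_eq] at hc
          simp [List.isPrefixOf]; exact fun e => hc e.symm
        rw [if_neg hpre]
        rw [ih rest (c :: cur) acc (by simpa using Nat.le_of_succ_le_succ h)]
        simp [partsOf, hc]

lemma splitOn_slash (l : List Char) :
    PySem.Chars.splitOn l ['/'] = (partsOf l).1 :: (partsOf l).2 := by
  unfold PySem.Chars.splitOn
  rw [go_spec _ _ _ _ (by omega)]
  simp

lemma slash_mem_iff (l : List Char) : '/' ∈ l ↔ (partsOf l).2 ≠ [] := by
  induction l with
  | nil => simp [partsOf]
  | cons c rest ih =>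
    by_cases hc : c == '/'
    · simp at hc; simp [partsOf, hc]
    · simp at hc; simp [partsOf, hc, ih, Ne.symm hc]

lemma parts_good (l : List Char) (h : l.all good4 = true) :
    (partsOf l).1.all good3 = true ∧ ∀ q ∈ (partsOf l).2, q.all good3 = true := by
  induction l with
  | nil => simp [partsOf]
  | cons c rest ih =>
    simp only [List.all_cons, Bool.and_eq_true] at h
    obtain ⟨hc, hrest⟩ := h
    obtain ⟨ih1, ih2⟩ := ih hrest
    by_cases hs : c == '/'
    · refine ⟨by simp [partsOf, hs], ?_⟩
      simp only [partsOf, hs, if_true]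
      intro q hq; rcases List.mem_cons.mp hq with rfl | hq
      · exact ih1
      · exact ih2 q hq
    · have hg3 : good3 c = true := by
        simp only [good4, Bool.or_eq_true] at hc
        rcases hc with ((h|h)|h)|h
        · simp [good3, h]
        · simp [good3, h]
        · simp [good3, h]
        · exact absurd h hs
      constructor
      · simp only [partsOf, hs, if_false, Bool.false_eq_true, List.all_cons, hg3, Bool.true_and]
        exact ih1
      · simp only [partsOf, hs, if_false, Bool.false_eq_true]
        exact ih2

lemma all_dig_eq (r : List Char) :
    r.all PySem.Chars.isdigit =
      (decide (r.count '.' = 0) && r.all (fun c => PySem.Chars.isdigit c || c == '.')) := by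
  induction r with
  | nil => simp
  | cons c s ih =>
    by_cases hc : c == '.'
    · simp only [beq_iff_eq] at hc; subst hc
      simp [List.count_cons, PySem.Chars.isdigit]
    · have hd : (c == '.') = false := by simpa using hc
      simp only [List.all_cons, List.count_cons, hd, if_false, Bool.or_false, ih]
      cases hdig : PySem.Chars.isdigit c <;> simp [hdig, Bool.and_left_comm, Bool.and_comm]

lemma replace_all_dig (q : List Char) :
    (pyReplaceDotOnce q).all PySem.Chars.isdigit =
      (decide (q.count '.' ≤ 1) && q.all (fun c => PySem.Chars.isdigit c || c == '.')) := by
  induction q with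
  | nil => simp [pyReplaceDotOnce]
  | cons c r ih =>
    by_cases hc : c == '.'
    · simp only [beq_iff_eq] at hc; subst hc
      simp only [pyReplaceDotOnce, if_pos rfl, List.all_cons, List.count_cons, if_pos rfl]
      rw [all_dig_eq]
      have : decide (r.count '.' + 1 ≤ 1) = decide (r.count '.' = 0) :=
        decide_eq_decide.mpr (by omega)
      simp [this, PySem.Chars.isdigit]
    · have hd : (c == '.') = false := by simpa using hc
      simp only [pyReplaceDotOnce, hd, Bool.false_eq_true, if_false, List.all_cons,
        List.count_cons, hd, Bool.or_false, ih]
      cases hdig : PySem.Chars.isdigit c <;> simp [hdig, Bool.and_left_comm, Bool.and_comm]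

lemma nonempty_all_dig (r : List Char) :
    (!r.isEmpty && r.all PySem.Chars.isdigit) =
      (decide (1 ≤ r.countP PySem.Chars.isdigit) && decide (r.count '.' = 0) &&
        r.all (fun c => PySem.Chars.isdigit c || c == '.')) := by
  induction r with
  | nil => simp
  | cons c s ih =>
    by_cases hcd : c == '.'
    · simp only [beq_iff_eq] at hcd; subst hcd
      simp [List.count_cons, PySem.Chars.isdigit]
    · have hd2 : (c == '.') = false := by simpa using hcd
      cases hdig : PySem.Chars.isdigit c
      · simp [hdig, hd2]
      · have h2 : decide (1 ≤ s.countP PySem.Chars.isdigit + 1) = true :=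
          decide_eq_true (by omega)
        simp [List.count_cons, List.countP_cons, hd2, hdig, h2, all_dig_eq s]

lemma strIsdigit_replace (p : List Char) :
    PySem.Chars.strIsdigit (pyReplaceDotOnce p) =
      (decide (1 ≤ p.countP PySem.Chars.isdigit) && decide (p.count '.' ≤ 1) &&
        p.all (fun c => PySem.Chars.isdigit c || c == '.')) := by
  cases p with
  | nil => simp [pyReplaceDotOnce, PySem.Chars.strIsdigit]
  | cons c r =>
    by_cases hc : c == '.'
    · simp only [beq_iff_eq] at hc; subst hc
      have hdd : PySem.Chars.isdigit '.' = false := by decide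
      simp only [pyReplaceDotOnce, if_true, beq_self_eq_true, List.all_cons, List.count_cons,
        List.countP_cons, hdd, Bool.false_eq_true, if_false, Nat.add_zero, Bool.false_or,
        Bool.true_or, Bool.true_and]
      have h1 : decide (r.count '.' + 1 ≤ 1) = decide (r.count '.' = 0) :=
        decide_eq_decide.mpr (by omega)
      rw [h1]
      unfold PySem.Chars.strIsdigit
      rw [nonempty_all_dig r]
    · have hd : (c == '.') = false := by simpa using hc
      simp only [pyReplaceDotOnce, hd, Bool.false_eq_true, if_false, List.all_cons,
        List.count_cons, List.countP_cons, hd, Bool.or_false]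
      unfold PySem.Chars.strIsdigit
      cases hdig : PySem.Chars.isdigit c
      · simp [hdig]
      · simp only [hdig, List.isEmpty_cons, Bool.not_false, List.all_cons, hdig, Bool.true_and,
          if_pos rfl, Bool.true_or, Bool.or_false]
        rw [replace_all_dig]
        have : decide (1 ≤ r.countP PySem.Chars.isdigit + 1) = true :=
          decide_eq_true (by omega)
        simp [this]

lemma all_digdot_of_good3 (r : List Char) (h : r.all good3 = true) :
    r.all (fun c => PySem.Chars.isdigit c || c == '.') = decide (r.count ',' = 0) := by
  induction r with
  | nil => simp
  | cons c s ih =>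
    simp only [List.all_cons, Bool.and_eq_true] at h
    obtain ⟨hc, hs⟩ := h
    simp only [good3, Bool.or_eq_true] at hc
    rcases hc with (h1|h1)|h1
    · have hne : (c == ',') = false := by
        revert h1; unfold PySem.Chars.isdigit; simp; intro a b e; subst e; revert a; decide
      simp [List.count_cons, hne, h1, ih hs]
    · simp only [beq_iff_eq] at h1; subst h1
      simp [List.count_cons, ih hs]
    · simp only [beq_iff_eq] at h1; subst h1
      simp [List.count_cons, PySem.Chars.isdigit]

/-- Per-segment agreement: under good3 chars, A's `replace`+`isdigit` test equals B's stats test. -/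
lemma seg_eq (r : List Char) (h : r.all good3 = true) :
    PySem.Chars.strIsdigit (pyReplaceDotOnce r) =
      (decide (1 ≤ (statsOf r).1) && decide ((statsOf r).2.1 ≤ 1) && ((statsOf r).2.2 == 0)) := by
  rw [strIsdigit_replace, all_digdot_of_good3 r h]
  simp only [statsOf, Bool.beq_eq_decide_eq]
  rfl

lemma core (l : List Char) :
    (let fracFail :=
      if PySem.Chars.isIn ['/'] l then
        let parts := PySem.Chars.splitOn l ['/']
        !(parts.length == 2) || !(parts.all fun part => PySem.Chars.strIsdigit (pyReplaceDotOnce part))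
      else false
     if fracFail then false
     else l.all fun c => PySem.Chars.isdigit c || ['.', ',', '/'].contains c) =
    (let st := l.foldl bStep ([], 0, 0, 0, true)
     let segs := st.1 ++ [(st.2.1, st.2.2.1, st.2.2.2.1)]
     if !st.2.2.2.2 then false
     else if segs.length == 1 then true
     else (segs.length == 2) && segs.all fun p => decide (1 ≤ p.1) && decide (p.2.1 ≤ 1) && (p.2.2 == 0)) := by
  have hfold := fold_spec l [] 0 0 0 true
  simp only [List.nil_append, Bool.true_and] at hfold
  have hsegs : (l.foldl bStep ([], 0, 0, 0, true)).1 ++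
      [((l.foldl bStep ([], 0, 0, 0, true)).2.1, (l.foldl bStep ([], 0, 0, 0, true)).2.2.1,
        (l.foldl bStep ([], 0, 0, 0, true)).2.2.2.1)] =
      addT (0, 0, 0) (statsOf (partsOf l).1) :: ((partsOf l).2).map statsOf :=
    congrArg Prod.fst hfold
  have hok : (l.foldl bStep ([], 0, 0, 0, true)).2.2.2.2 = l.all good4 :=
    congrArg Prod.snd hfold
  have haddT : addT (0, 0, 0) (statsOf (partsOf l).1) = statsOf (partsOf l).1 := by
    simp [addT]
  rw [haddT] at hsegs
  have hgood : (l.all fun c => PySem.Chars.isdigit c || ['.', ',', '/'].contains c) =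
      l.all good4 := by
    refine List.all_congr rfl fun c => ?_
    simp [good4, List.contains_eq_any_beq, Bool.or_assoc, Bool.beq_eq_decide_eq]
  simp only [hsegs, hok, hgood, splitOn_slash]
  rcases h2 : (partsOf l).2 with _ | ⟨q, qs⟩
  · have hin : PySem.Chars.isIn ['/'] l = false := by
      rw [← Bool.not_eq_true, PySem.Chars.isIn_iff_infix, List.singleton_infix_iff,
        slash_mem_iff, h2]
      simp
    simp only [hin, Bool.false_eq_true, if_false, h2, List.map_nil, List.length_cons,
      List.length_nil]
    cases hall : l.all good4 <;> simp [hall]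
  · have hin : PySem.Chars.isIn ['/'] l = true := by
      rw [PySem.Chars.isIn_iff_infix, List.singleton_infix_iff, slash_mem_iff, h2]
      simp
    simp only [hin, if_true, h2]
    cases hall : l.all good4
    · simp only [hall, Bool.not_false, if_true]
      split <;> rfl
    · simp only [hall, Bool.not_true, Bool.false_eq_true, if_false]
      obtain ⟨hp, hq⟩ := parts_good l hall
      rw [h2] at hq
      cases qs with
      | nil =>
        simp only [List.map_cons, List.map_nil, List.length_cons, List.length_nil, List.all_cons,
          List.all_nil, Bool.and_true]
        rw [seg_eq _ hp, seg_eq _ (hq q (by simp))]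
        have e1 : ∀ n : Nat, (!decide (n = 0)) = decide (1 ≤ n) := fun n => by
          rw [← decide_not]; exact decide_eq_decide.mpr (by omega)
        have e2 : ∀ n : Nat, (!decide (1 < n)) = decide (n ≤ 1) := fun n => by
          rw [← decide_not]; exact decide_eq_decide.mpr (by omega)
        have e3 : ∀ n : Nat, (!decide (1 ≤ n)) = decide (n = 0) := fun n => by
          rw [← decide_not]; exact decide_eq_decide.mpr (by omega)
        simp [e1, e2, e3, Bool.beq_eq_decide_eq]
      | cons q2 qs2 =>
        simp only [List.map_cons, List.length_cons, List.all_cons]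
        have hn1 : (qs2.length + 1 + 1 + 1 == 1) = false := by simp
        have hn2 : (qs2.length + 1 + 1 + 1 == 2) = false := by
          simp [Nat.beq_eq_true_eq]
        simp [hn1, hn2]

-- ===== VERDICT (by name: the statement is the Claim_ definition above) =====
theorem is_valid_element_spec : Claim_equal_is_valid_element := by
  intro element _
  unfold Spec_is_valid_element is_valid_element is_valid_element_alt
  by_cases h : element == "-"
  · simp [h]
  · simp only [h]
    exact core _
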